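-- pv_equiv track=rewrite | github.com/woonderer/advent-of-code | 2023/day13/part1.py | vertical
-- ===== SOURCE A (Python) =====
-- def vertical(T):
--     ans = 0
--     for i in range(len(T[0]) - 1):
--         good = True
--         for line in T:
--             l, r = i, i + 1
--             while l >= 0 and r < len(T[0]):
--                 if line[l] != line[r]:
--                     good = False
--                     break
--
--                 l -= 1
--                 r += 1
--
--             if not good: break
--
--         if good: ans += i + 1
--
--     return ans
--
-- ans = 0
-- ===== SOURCE B (Python) =====
-- def vertical(T):
--     # row-major: keep the list of candidate split positions and filter it per row
--     # by comparing the reversed left part with the right part (zip truncates at the edge)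
--     w = len(T[0])
--     valid = list(range(w - 1))
--     for line in T:
--         valid = [i for i in valid
--                  if all(a == b for a, b in zip(reversed(line[:i + 1]), line[i + 1:w]))]
--     return sum(i + 1 for i in valid)
-- ===== Notes on version B (the rewrite author's own statement) =====
-- stated objective: alternative
-- what changed: A scans split-major with a hand-written two-pointer while-loop per (split, row) and an early break; B scans row-major, keeping the list of still-valid split positions and filtering it per row by comparing the reversed left slice with the right slice via zip/all.
-- outside the precondition, e.g. on vertical(['ab', 'a']): A returns 0, B returns 0
import Mathlib
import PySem

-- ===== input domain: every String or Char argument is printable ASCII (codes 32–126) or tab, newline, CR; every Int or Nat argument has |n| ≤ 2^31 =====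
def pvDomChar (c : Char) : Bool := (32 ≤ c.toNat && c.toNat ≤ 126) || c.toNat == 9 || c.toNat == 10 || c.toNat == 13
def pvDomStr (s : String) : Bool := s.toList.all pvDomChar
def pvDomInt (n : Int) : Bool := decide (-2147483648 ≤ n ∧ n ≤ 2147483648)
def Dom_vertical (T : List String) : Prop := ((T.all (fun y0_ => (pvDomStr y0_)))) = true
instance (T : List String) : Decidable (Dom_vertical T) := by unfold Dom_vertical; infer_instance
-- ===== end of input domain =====

-- B replaces A's split-major two-pointer scan by a row-major pass that filters the
-- list of candidate splits per row with a reversed-prefix/suffix zip comparison (objective: alternative).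

-- ===== PORT A =====
-- the inner 'while l >= 0 and r < len(T[0])' loop; fuel bounds the countdown of l
-- (l decreases by 1 each pass, so l.toNat + 1 fuel is always enough)
def vwhile (cs : List Char) (w : Int) : Nat → Int → Int → Bool
  | 0, _, _ => true
  | fuel+1, l, r =>
    if l ≥ 0 ∧ r < w then
      match PySem.List.pyGet? cs l, PySem.List.pyGet? cs r with
      | some a, some b => if a ≠ b then false else vwhile cs w fuel (l-1) (r+1)
      | _, _ => false   -- Python raises IndexError here; excluded by Pre_vertical
    else true

-- 'for line in T: … if not good: break'
def rowScan (w i : Int) : List String → Bool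
  | [] => true
  | line :: rest =>
      if vwhile line.toList w (i.toNat + 1) i (i+1) then rowScan w i rest else false

def vertical (T : List String) : Int :=
  let w := PySem.Str.len T.headI   -- len(T[0]); Pre_vertical gives T ≠ []
  (PySem.List.pyRange 0 (w-1) 1).foldl
    (fun ans i => if rowScan w i T then ans + (i + 1) else ans) 0

-- ===== PORT B =====
-- all(a == b for a, b in zip(reversed(line[:i+1]), line[i+1:w]))
def mirrorRow (line : String) (w i : Int) : Bool :=
  ((PySem.List.slice line.toList none (some (i+1))).reverse.zip
     (PySem.List.slice line.toList (some (i+1)) (some w))).all (fun p => p.1 == p.2)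

def vertical_alt (T : List String) : Int :=
  let w := PySem.Str.len T.headI   -- len(T[0])
  let valid := T.foldl (fun v line => v.filter (fun i => mirrorRow line w i))
                 (PySem.List.pyRange 0 (w-1) 1)
  valid.foldl (fun s i => s + (i + 1)) 0

-- ===== PRECONDITION & SPEC =====
-- Pre_ restricts to A's natural domain: nonempty tables in which (unless the first row has
-- width ≤ 1, when A scans nothing) every row is at least as long as the first row; on the
-- empty table A raises IndexError at T[0], and on a shorter row A's two-pointer scan may
-- index past the row's end and raise IndexError mid-comparison (whether it does depends on
-- where the first mismatch falls, which is not a closed-form condition; where A happens to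
-- return there, B agrees on every input we sampled, but that agreement is not claimed).
def Pre_vertical (T : List String) : Prop :=
  T ≠ [] ∧ (PySem.Str.len T.headI ≤ 1 ∨
    ∀ s ∈ T, PySem.Str.len T.headI ≤ PySem.Str.len s)
instance (T : List String) : Decidable (Pre_vertical T) := by unfold Pre_vertical; infer_instance
def pvWitness_vertical : List String := ["abba", "acca"]

def Spec_vertical (T : List String) (out : Int) : Prop := out = vertical_alt T
instance (T : List String) (out : Int) : Decidable (Spec_vertical T out) := by unfold Spec_vertical; infer_instance

-- ===== CLAIM (what is proved, stated in full; the proofs are below) =====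
def Claim_equal_vertical : Prop := ∀ (T : List String), Dom_vertical T → Pre_vertical T → Spec_vertical T (vertical T)

-- ===== LEMMAS AND PROOFS =====

-- the common mathematical reading of one row's check at split l|r
def MirrorP (cs : List Char) (w l r : Int) : Prop :=
  ∀ j : Nat, (j : Int) ≤ l → r + j < w →
    PySem.List.pyGet? cs (l - j) = PySem.List.pyGet? cs (r + j)

theorem pyGet?_nat (cs : List Char) (n : Nat) : PySem.List.pyGet? cs (n : Int) = cs[n]? := by
  simp [pysem]

theorem vwhile_iff (cs : List Char) (w : Int) (hw : w ≤ (cs.length : Int)) :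
    ∀ (fuel : Nat) (l r : Int), 0 ≤ r → l < r → l < (fuel : Int) →
      (vwhile cs w fuel l r = true ↔ MirrorP cs w l r) := by
  intro fuel
  induction fuel with
  | zero =>
      intro l r _ _ hf
      simp only [vwhile, true_iff]
      intro j hj _
      omega
  | succ fuel ih =>
      intro l r hr hlr hf
      by_cases hg : l ≥ 0 ∧ r < w
      · have hln : l.toNat < cs.length := by omega
        have hrn : r.toNat < cs.length := by omega
        have hgl : PySem.List.pyGet? cs l = some cs[l.toNat] := by
          have h1 : PySem.List.pyGet? cs l = cs[l.toNat]? := by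
            conv_lhs => rw [show l = ((l.toNat : Nat) : Int) by omega]
            exact pyGet?_nat cs l.toNat
          rw [h1, List.getElem?_eq_getElem hln]
        have hgr : PySem.List.pyGet? cs r = some cs[r.toNat] := by
          have h1 : PySem.List.pyGet? cs r = cs[r.toNat]? := by
            conv_lhs => rw [show r = ((r.toNat : Nat) : Int) by omega]
            exact pyGet?_nat cs r.toNat
          rw [h1, List.getElem?_eq_getElem hrn]
        rw [show vwhile cs w (fuel+1) l r
            = (if cs[l.toNat] ≠ cs[r.toNat] then false
               else vwhile cs w fuel (l-1) (r+1)) by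
          simp only [vwhile, if_pos hg, hgl, hgr]]
        by_cases hab : cs[l.toNat] = cs[r.toNat]
        · rw [if_neg (fun h => h hab)]
          rw [ih (l-1) (r+1) (by omega) (by omega) (by omega)]
          constructor
          · intro h j hj1 hj2
            cases j with
            | zero => simpa [hgl, hgr] using hab
            | succ j' =>
                have := h j' (by omega) (by omega)
                rw [show l - ((j'+1 : Nat) : Int) = (l-1) - j' by push_cast; ring,
                    show r + ((j'+1 : Nat) : Int) = (r+1) + j' by push_cast; ring]
                exact this
          · intro h j hj1 hj2
            have := h (j+1) (by push_cast; omega) (by push_cast; omega)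
            rw [show l - ((j+1 : Nat) : Int) = (l-1) - j by push_cast; ring,
                show r + ((j+1 : Nat) : Int) = (r+1) + j by push_cast; ring] at this
            exact this
        · rw [if_pos hab]
          refine iff_of_false (by simp) ?_
          intro hM
          have := hM 0 (by omega) (by omega)
          simp only [Nat.cast_zero, sub_zero, add_zero, hgl, hgr] at this
          exact hab (by simpa using this)
      · simp only [vwhile, if_neg hg, true_iff]
        intro j hj1 hj2
        omega

theorem zip_all_iff (xs ys : List Char) :
    ((xs.zip ys).all (fun p => p.1 == p.2) = true) ↔
      ∀ j : Nat, j < min xs.length ys.length → xs[j]? = ys[j]? := by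
  induction xs generalizing ys with
  | nil => simp
  | cons x xs ih =>
      cases ys with
      | nil => simp
      | cons y ys =>
          simp only [List.zip_cons_cons, List.all_cons, Bool.and_eq_true, beq_iff_eq, ih]
          constructor
          · rintro ⟨hxy, hrest⟩ j hj
            cases j with
            | zero => simp [hxy]
            | succ j' =>
                simp only [List.getElem?_cons_succ]
                exact hrest j' (by simp at hj ⊢; omega)
          · intro h
            refine ⟨?_, fun j hj => ?_⟩
            · have := h 0 (by simp)
              simpa using this
            · have := h (j+1) (by simp at hj ⊢; omega)
              simpa using this

theorem mirrorRow_iff (line : String) (w i : Int) (hi : 0 ≤ i) (hiw : i + 1 < w)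
    (hw : w ≤ (line.toList.length : Int)) :
    (mirrorRow line w i = true ↔ MirrorP line.toList w i (i+1)) := by
  set cs := line.toList with hcs
  have h1 : PySem.List.slice cs none (some (i+1)) = cs.take (i+1).toNat :=
    PySem.List.slice_to cs (by omega)
  have h2 : PySem.List.slice cs (some (i+1)) (some w)
      = (cs.drop (i+1).toNat).take (w.toNat - (i+1).toNat) :=
    PySem.List.slice_toNat cs (by omega) (by omega)
  rw [mirrorRow, ← hcs, h1, h2, zip_all_iff]
  have hlen1 : (cs.take (i+1).toNat).reverse.length = (i+1).toNat := by
    simp; omega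
  have hlen2 : ((cs.drop (i+1).toNat).take (w.toNat - (i+1).toNat)).length
      = w.toNat - (i+1).toNat := by
    simp; omega
  have lemA : ∀ j : Nat, j < (i+1).toNat →
      (cs.take (i+1).toNat).reverse[j]? = cs[(i+1).toNat - 1 - j]? := by
    intro j hj
    rw [List.getElem?_reverse (by simp; omega), List.length_take]
    rw [show min (i+1).toNat cs.length - 1 - j = (i+1).toNat - 1 - j by omega]
    exact List.getElem?_take_of_lt (by omega)
  have lemB : ∀ j : Nat, j < w.toNat - (i+1).toNat →
      ((cs.drop (i+1).toNat).take (w.toNat - (i+1).toNat))[j]? = cs[(i+1).toNat + j]? := by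
    intro j hj
    rw [List.getElem?_take_of_lt hj, List.getElem?_drop]
  have castA : ∀ j : Nat, (j : Int) ≤ i →
      PySem.List.pyGet? cs (i - j) = cs[(i+1).toNat - 1 - j]? := by
    intro j hj
    conv_lhs => rw [show i - (j : Int) = (((i+1).toNat - 1 - j : Nat) : Int) by omega]
    exact pyGet?_nat cs _
  have castB : ∀ j : Nat,
      PySem.List.pyGet? cs (i + 1 + j) = cs[(i+1).toNat + j]? := by
    intro j
    conv_lhs => rw [show i + 1 + (j : Int) = (((i+1).toNat + j : Nat) : Int) by omega]
    exact pyGet?_nat cs _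
  constructor
  · intro h j hj1 hj2
    have hb : j < min (cs.take (i+1).toNat).reverse.length
        ((cs.drop (i+1).toNat).take (w.toNat - (i+1).toNat)).length := by
      rw [hlen1, hlen2]; omega
    have := h j hb
    rw [lemA j (by omega), lemB j (by omega)] at this
    rw [castA j hj1, castB j]
    exact this
  · intro h j hj
    rw [hlen1, hlen2] at hj
    rw [lemA j (by omega), lemB j (by omega)]
    have := h j (by omega) (by omega)
    rw [castA j (by omega), castB j] at this
    exact this

theorem rowScan_eq_all (w i : Int) (T : List String) :
    rowScan w i T = T.all (fun line => vwhile line.toList w (i.toNat + 1) i (i+1)) := by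
  induction T with
  | nil => rfl
  | cons line rest ih =>
      simp only [rowScan, ih, List.all_cons]
      cases vwhile line.toList w (i.toNat + 1) i (i+1) <;> simp

theorem foldl_filter_all (T : List String) (q : String → Int → Bool) :
    ∀ v : List Int,
      T.foldl (fun v line => v.filter (q line)) v
        = v.filter (fun i => T.all (fun line => q line i)) := by
  induction T with
  | nil => simp
  | cons line rest ih =>
      intro v
      simp only [List.foldl_cons, ih, List.filter_filter, List.all_cons]
      exact List.filter_congr (fun a _ => Bool.and_comm _ _)

theorem foldl_if_filter (p : Int → Bool) (l : List Int) :
    ∀ init : Int,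
      l.foldl (fun a i => if p i then a + (i + 1) else a) init
        = (l.filter p).foldl (fun a i => a + (i + 1)) init := by
  induction l with
  | nil => intro init; rfl
  | cons x xs ih =>
      intro init
      by_cases h : p x <;> simp [h, ih]

-- ===== VERDICT (by name: the statement is the Claim_ definition above) =====
theorem vertical_spec : Claim_equal_vertical := by
  intro T _hdom hpre
  obtain ⟨hne, hor⟩ := hpre
  unfold Spec_vertical vertical vertical_alt
  simp only []
  set w := PySem.Str.len T.headI with hw
  rw [foldl_if_filter, foldl_filter_all]
  rcases hor with hsmall | hlen
  · rw [PySem.List.pyRange_one_eq_nil (by omega)]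
    simp
  congr 1
  apply List.filter_congr
  intro i hi
  rw [PySem.List.mem_pyRange_one] at hi
  rw [rowScan_eq_all]
  apply Bool.eq_iff_iff.mpr
  simp only [List.all_eq_true]
  constructor
  · intro h line hl
    have hlw : w ≤ (line.toList.length : Int) := by
      have := hlen line hl
      simpa [PySem.Str.len_eq, ← hw] using this
    exact (mirrorRow_iff line w i hi.1 (by omega) hlw).mpr
      ((vwhile_iff line.toList w hlw _ i (i+1) (by omega) (by omega) (by omega)).mp (h line hl))
  · intro h line hl
    have hlw : w ≤ (line.toList.length : Int) := by
      have := hlen line hl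
      simpa [PySem.Str.len_eq, ← hw] using this
    exact (vwhile_iff line.toList w hlw _ i (i+1) (by omega) (by omega) (by omega)).mpr
      ((mirrorRow_iff line w i hi.1 (by omega) hlw).mp (h line hl))
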